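-- pv_equiv track=rewrite | github.com/wyi616/intTestingResearch | naive_version.py | interCounter
-- ===== SOURCE A (Python) =====
-- def interCounter(row, seenInteractions):
--   CA = []
--   newInters = set()
--   for i in range(len(row)):
--       for j in range(i+1,len(row)):
--           if row[i] != -1 and row[j] != -1:
--               interaction = ''.join([str(row[i]),str(row[j]),'r',str(i),'c',str(j)]);
--               if interaction not in seenInteractions:
--                   newInters.add(interaction)
--   return newInters
-- ===== SOURCE B (Python) =====
-- def interCounter(row, seenInteractions):
--     seen = set(seenInteractions)
--     actives = [(i, v) for i, v in enumerate(row) if v != -1]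
--     newInters = set()
--     rest = actives
--     while rest:
--         (i, vi), rest = rest[0], rest[1:]
--         for j, vj in rest:
--             inter = f'{vi}{vj}r{i}c{j}'
--             if inter not in seen:
--                 newInters.add(inter)
--     return newInters
-- ===== Notes on version B (the rewrite author's own statement) =====
-- stated objective: alternative
-- what changed: B prefilters the non-(-1) entries once into an (index, value) list and iterates over ordered pairs of that list with a hash-set for the seen-lookup, instead of A's all-pairs index scan with an inner validity branch and a list-membership test.
import Mathlib
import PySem

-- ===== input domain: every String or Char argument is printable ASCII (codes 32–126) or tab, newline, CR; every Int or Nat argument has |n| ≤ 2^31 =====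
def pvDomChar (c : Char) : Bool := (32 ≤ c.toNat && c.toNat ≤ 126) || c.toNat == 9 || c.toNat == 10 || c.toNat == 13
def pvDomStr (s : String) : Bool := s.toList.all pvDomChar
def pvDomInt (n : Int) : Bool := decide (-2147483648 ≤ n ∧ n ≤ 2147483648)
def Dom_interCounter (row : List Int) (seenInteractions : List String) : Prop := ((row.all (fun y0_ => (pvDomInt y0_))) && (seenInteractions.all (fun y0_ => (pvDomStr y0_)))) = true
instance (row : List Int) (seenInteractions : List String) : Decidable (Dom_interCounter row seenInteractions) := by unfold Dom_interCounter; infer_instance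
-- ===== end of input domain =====

-- B prefilters the non(-1) positions once (with their original indices) and uses a hash set for the
-- seen-lookup, instead of A's all-pairs scan with an inner branch and a list-membership test.

-- the interaction string str(vi)+str(vj)+'r'+str(i)+'c'+str(j), shared by both ports
def pvMkInter (vi vj i j : Int) : String :=
  PySem.Int.toStr vi ++ PySem.Int.toStr vj ++ "r" ++ PySem.Int.toStr i ++ "c" ++ PySem.Int.toStr j

-- ===== PORT A =====
def interCounter (row : List Int) (seenInteractions : List String) : List String :=
  (PySem.List.pyRange 0 (row.length : Int) 1).foldl (fun newInters i =>
    (PySem.List.pyRange (i + 1) (row.length : Int) 1).foldl (fun newInters j =>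
      if PySem.List.pyGetD row i 0 ≠ -1 ∧ PySem.List.pyGetD row j 0 ≠ -1 then
        let interaction := pvMkInter (PySem.List.pyGetD row i 0) (PySem.List.pyGetD row j 0) i j
        if interaction ∈ seenInteractions then newInters
        else PySem.Set.add newInters interaction
      else newInters) newInters) PySem.Set.empty

-- ===== PORT B =====
-- 'while rest: (i,vi), rest = rest[0], rest[1:]; for (j,vj) in rest: …' from Source B
def pvAltLoop (rest : List (Int × Int)) (seen : PySem.Set String) (out : PySem.Set String) : PySem.Set String :=
  match rest with
  | [] => out
  | a :: rest' =>
    pvAltLoop rest' seen (rest'.foldl (fun out b =>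
      let inter := pvMkInter a.2 b.2 a.1 b.1
      if PySem.Set.contains seen inter then out else PySem.Set.add out inter) out)

def interCounter_alt (row : List Int) (seenInteractions : List String) : List String :=
  let seen := PySem.Set.ofList seenInteractions
  let actives := (PySem.List.enumerate row).filter (fun p => decide (p.2 ≠ -1))
  pvAltLoop actives seen PySem.Set.empty

-- ===== PRECONDITION & SPEC =====
def Spec_interCounter (row : List Int) (seenInteractions : List String) (out : List String) : Prop := out = interCounter_alt row seenInteractions
instance (row : List Int) (seenInteractions : List String) (out : List String) : Decidable (Spec_interCounter row seenInteractions out) := by unfold Spec_interCounter; infer_instance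

-- ===== CLAIM (what is proved, stated in full; the proofs are below) =====
def Claim_equal_interCounter : Prop := ∀ (row : List Int) (seenInteractions : List String), Dom_interCounter row seenInteractions → Spec_interCounter row seenInteractions (interCounter row seenInteractions)

-- ===== LEMMAS AND PROOFS =====

-- the "add if not seen" step both programs perform, as a fold step over the interaction strings
def pvStep (seen : List String) (out : PySem.Set String) (s : String) : PySem.Set String :=
  if s ∈ seen then out else PySem.Set.add out s

def pvMk (a b : Int × Int) : String := pvMkInter a.2 b.2 a.1 b.1

-- all ordered pairs (earlier element, later element) of a list
def pvSufPairs {α : Type} : List α → List (α × α)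
  | [] => []
  | a :: r => r.map (fun b => (a, b)) ++ pvSufPairs r

def pvF (p : (Int × Int) × (Int × Int)) : Option String :=
  if p.1.2 ≠ -1 ∧ p.2.2 ≠ -1 then some (pvMk p.1 p.2) else none

lemma pv_foldl_foldl_flatMap {α β σ : Type} (f : σ → β → σ) (h : α → List β) :
    ∀ (l : List α) (init : σ),
      l.foldl (fun acc a => (h a).foldl f acc) init = (l.flatMap h).foldl f init := by
  intro l
  induction l with
  | nil => intro init; rfl
  | cons a r ih => intro init; simp [List.flatMap_cons, List.foldl_append, ih]

lemma pv_filterMap_if {α β : Type} (p : α → Prop) [DecidablePred p] (f : α → β) :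
    ∀ l : List α,
      l.filterMap (fun x => if p x then some (f x) else none)
        = (l.filter (fun x => decide (p x))).map f := by
  intro l
  induction l with
  | nil => rfl
  | cons a r ih =>
    by_cases h : p a <;> simp [h, ih]

lemma pv_enumerate_drop (row : List Int) :
    ∀ (k s : Nat), row.length - s = k →
      PySem.List.enumerate (row.drop s) (s : Int)
        = (PySem.List.pyRange (s : Int) (row.length : Int) 1).map
            (fun j => (j, PySem.List.pyGetD row j 0)) := by
  intro k
  induction k with
  | zero =>
    intro s hs
    have hle : row.length ≤ s := by omega
    rw [List.drop_eq_nil_of_le hle, PySem.List.pyRange_one_eq_nil (by exact_mod_cast hle)]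
    simp [PySem.List.enumerate]
  | succ k ih =>
    intro s hs
    have hlt : s < row.length := by omega
    rw [List.drop_eq_getElem_cons hlt,
        PySem.List.pyRange_one_cons (by exact_mod_cast hlt)]
    have h1 : ((s : Int) + 1) = ((s + 1 : Nat) : Int) := by push_cast; ring
    rw [List.map_cons, PySem.List.enumerate_cons, h1, ih (s + 1) (by omega)]
    have hg : PySem.List.pyGetD row (s : Int) 0 = row[s] := by
      rw [PySem.List.pyGetD_natCast]; simp [List.getElem?_eq_getElem hlt]
    rw [hg]

lemma pv_strsA (row : List Int) :
    ∀ (k s : Nat), row.length - s = k →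
      (PySem.List.pyRange (s : Int) (row.length : Int) 1).flatMap
        (fun i =>
          ((PySem.List.pyRange (i + 1) (row.length : Int) 1).filter
              (fun j => decide (PySem.List.pyGetD row i 0 ≠ -1 ∧ PySem.List.pyGetD row j 0 ≠ -1))).map
            (fun j => pvMkInter (PySem.List.pyGetD row i 0) (PySem.List.pyGetD row j 0) i j))
        = (pvSufPairs (PySem.List.enumerate (row.drop s) (s : Int))).filterMap pvF := by
  intro k
  induction k with
  | zero =>
    intro s hs
    have hle : row.length ≤ s := by omega
    rw [List.drop_eq_nil_of_le hle, PySem.List.pyRange_one_eq_nil (by exact_mod_cast hle)]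
    simp [PySem.List.enumerate, pvSufPairs]
  | succ k ih =>
    intro s hs
    have hlt : s < row.length := by omega
    rw [List.drop_eq_getElem_cons hlt,
        PySem.List.pyRange_one_cons (by exact_mod_cast hlt), List.flatMap_cons,
        PySem.List.enumerate_cons]
    have h1 : ((s : Int) + 1) = ((s + 1 : Nat) : Int) := by push_cast; ring
    have hg : PySem.List.pyGetD row (s : Int) 0 = row[s] := by
      rw [PySem.List.pyGetD_natCast]; simp [List.getElem?_eq_getElem hlt]
    show _ ++ _ = (pvSufPairs (_ :: _)).filterMap pvF
    rw [pvSufPairs, List.filterMap_append]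
    congr 1
    · -- head block
      have he : PySem.List.enumerate (row.drop (s + 1)) ((s : Int) + 1)
          = (PySem.List.pyRange ((s + 1 : Nat) : Int) (row.length : Int) 1).map
              (fun j => (j, PySem.List.pyGetD row j 0)) := by
        rw [h1]; exact pv_enumerate_drop row k (s + 1) (by omega)
      rw [he, List.filterMap_map, List.filterMap_map, ← pv_filterMap_if
            (p := fun j => PySem.List.pyGetD row (s : Int) 0 ≠ -1 ∧ PySem.List.pyGetD row j 0 ≠ -1)
            (f := fun j => pvMkInter (PySem.List.pyGetD row (s : Int) 0) (PySem.List.pyGetD row j 0) (s : Int) j)]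
      apply List.filterMap_congr
      intro j _
      simp [Function.comp, pvF, pvMk, hg]
  -- tail block handled below
    · rw [h1, ih (s + 1) (by omega)]

-- B's loop is the fold of pvStep over the pair strings of its input list
lemma pv_altLoop_eq (seen : List String) :
    ∀ (l : List (Int × Int)) (out : PySem.Set String),
      pvAltLoop l (PySem.Set.ofList seen) out
        = ((pvSufPairs l).map (fun q => pvMk q.1 q.2)).foldl (pvStep seen) out := by
  intro l
  induction l with
  | nil => intro out; rfl
  | cons a r ih =>
    intro out
    rw [pvAltLoop, ih, pvSufPairs, List.map_append, List.foldl_append]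
    congr 1
    rw [List.map_map, List.foldl_map]
    apply PySem.List.foldl_congr_mem
    intro acc x _
    simp [pvStep, pvMk, PySem.Set.mem_ofList]

-- A is the fold of pvStep over the surviving pair strings, in the same order
lemma pv_A_eq (row : List Int) (seen : List String) :
    interCounter row seen
      = ((pvSufPairs (PySem.List.enumerate row)).filterMap pvF).foldl (pvStep seen) [] := by
  have hA := pv_strsA row row.length 0 (by omega)
  simp only [Nat.cast_zero, List.drop_zero] at hA
  rw [← hA, interCounter]
  rw [← pv_foldl_foldl_flatMap (pvStep seen)
        (fun i =>
          ((PySem.List.pyRange (i + 1) (row.length : Int) 1).filter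
              (fun j => decide (PySem.List.pyGetD row i 0 ≠ -1 ∧ PySem.List.pyGetD row j 0 ≠ -1))).map
            (fun j => pvMkInter (PySem.List.pyGetD row i 0) (PySem.List.pyGetD row j 0) i j))]
  apply PySem.List.foldl_congr_mem
  intro acc i _
  rw [List.foldl_map, List.foldl_filter]
  apply PySem.List.foldl_congr_mem
  intro acc' j _
  by_cases h : PySem.List.pyGetD row i 0 ≠ -1 ∧ PySem.List.pyGetD row j 0 ≠ -1 <;>
    simp [pvStep, h]

-- the surviving pairs of A are exactly the pairs of the prefiltered actives, in order
lemma pv_pairs_filter :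
    ∀ l : List (Int × Int),
      (pvSufPairs l).filterMap pvF
        = (pvSufPairs (l.filter (fun p => decide (p.2 ≠ -1)))).map (fun q => pvMk q.1 q.2) := by
  intro l
  induction l with
  | nil => rfl
  | cons a r ih =>
    rw [pvSufPairs, List.filterMap_append, List.filterMap_map, ih, List.filter_cons]
    by_cases h : a.2 = -1
    · simp only [h, decide_eq_true_eq]
      simp
      intro x y _
      simp [pvF, h]
    · simp only [decide_eq_true_eq, if_pos (by exact h : a.2 ≠ -1)]
      rw [pvSufPairs, List.map_append, List.map_map]
      congr 1
      have : (pvF ∘ fun b => (a, b)) = fun b => if b.2 ≠ -1 then some (pvMk a b) else none := by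
        funext b; simp [Function.comp, pvF, h]
      rw [this, pv_filterMap_if (p := fun b : Int × Int => b.2 ≠ -1) (f := fun b => pvMk a b)]
      simp [Function.comp]

-- ===== VERDICT (by name: the statement is the Claim_ definition above) =====
theorem interCounter_spec : Claim_equal_interCounter := by
  intro row seen _
  show interCounter row seen = interCounter_alt row seen
  rw [pv_A_eq, pv_pairs_filter, interCounter_alt]
  exact (pv_altLoop_eq seen _ _).symm
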